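-- pv_equiv track=rewrite | github.com/samswain2/MSiA-SQ | MSiA 431/02_hw/02_question_music/main_music.py | create_reducer_chunks
-- ===== SOURCE A (Python) =====
-- def create_reducer_chunks(sorted_lines, num_reducers):
--     reducer_chunks = []
--     chunk = []
--     current_artist = None
--
--     for artist, duration in sorted_lines:
--         if current_artist is None:
--             current_artist = artist
--
--         if artist != current_artist and len(reducer_chunks) < num_reducers - 1:
--             reducer_chunks.append(chunk)
--             chunk = []
--             current_artist = artist
--
--         chunk.append((artist, duration))
--
--     if chunk:
--         reducer_chunks.append(chunk)
--
--     return reducer_chunks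
-- ===== SOURCE B (Python) =====
-- def create_reducer_chunks(sorted_lines, num_reducers):
--     # Pass 1: group into runs of consecutive equal-artist lines.
--     runs = []
--     i = 0
--     n = len(sorted_lines)
--     while i < n:
--         current = sorted_lines[i][0]
--         j = i + 1
--         while j < n and sorted_lines[j][0] == current:
--             j += 1
--         runs.append([(artist, duration) for artist, duration in sorted_lines[i:j]])
--         i = j
--     # Pass 2: first (num_reducers - 1) runs are their own chunks, the rest merge.
--     limit = max(num_reducers - 1, 0)
--     chunks = runs[:limit]
--     tail = runs[limit:]
--     if tail:
--         chunks.append([pair for run in tail for pair in run])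
--     return chunks
-- ===== Notes on version B (the rewrite author's own statement) =====
-- stated objective: alternative
-- what changed: Replaces A's single stateful loop (open chunk + current-artist + live reducer-count check) with a two-phase decomposition: first group the lines into same-artist runs, then slice off the first num_reducers-1 runs as chunks and flatten the remainder into one final chunk.
import Mathlib
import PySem

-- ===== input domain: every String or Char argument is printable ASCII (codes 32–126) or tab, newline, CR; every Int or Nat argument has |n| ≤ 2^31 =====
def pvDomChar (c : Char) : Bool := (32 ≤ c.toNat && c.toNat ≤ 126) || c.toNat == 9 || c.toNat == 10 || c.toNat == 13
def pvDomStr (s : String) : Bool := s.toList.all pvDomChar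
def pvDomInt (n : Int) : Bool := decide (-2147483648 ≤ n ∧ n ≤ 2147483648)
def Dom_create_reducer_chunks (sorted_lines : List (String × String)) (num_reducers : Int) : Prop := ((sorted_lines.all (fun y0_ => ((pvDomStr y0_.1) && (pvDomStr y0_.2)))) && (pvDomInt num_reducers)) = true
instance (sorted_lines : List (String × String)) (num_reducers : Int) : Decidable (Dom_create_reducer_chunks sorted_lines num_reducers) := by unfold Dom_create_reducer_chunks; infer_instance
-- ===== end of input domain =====

-- B replaces A's single stateful loop by a two-phase decomposition (group into same-artist
-- runs, then slice off the first num_reducers-1 runs and flatten the rest); return values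
-- are proved equal on all inputs (objective: alternative).

-- ===== PORT A =====
-- one loop iteration of A: state = (reducer_chunks, chunk, current_artist)
def crcStepA (num_reducers : Int)
    (st : List (List (String × String)) × List (String × String) × Option String)
    (p : String × String) :
    List (List (String × String)) × List (String × String) × Option String :=
  let rc := st.1
  let chunk := st.2.1
  -- if current_artist is None: current_artist = artist
  let cur : Option String := match st.2.2 with
    | none => some p.1
    | some c => some c
  -- if artist != current_artist and len(reducer_chunks) < num_reducers - 1
  if some p.1 ≠ cur ∧ (rc.length : Int) < num_reducers - 1 then
    (rc ++ [chunk], [p], some p.1)   -- append chunk; chunk = []; current_artist = artist; chunk.append(p)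
  else
    (rc, chunk ++ [p], cur)          -- chunk.append(p)

def create_reducer_chunks (sorted_lines : List (String × String)) (num_reducers : Int) : List (List (String × String)) :=
  let st := sorted_lines.foldl (crcStepA num_reducers) ([], [], none)
  if st.2.1.isEmpty then st.1 else st.1 ++ [st.2.1]   -- if chunk: reducer_chunks.append(chunk)

-- ===== PORT B =====
-- phase 1 of B: the outer while-loop over the remaining suffix; each pass peels one
-- maximal same-artist run (the inner `while rest[k][0] == artist` scan = takeWhile/dropWhile)
def crcRuns : List (String × String) → List (List (String × String))
  | [] => []
  | p :: rest =>
    let same := rest.takeWhile (fun q => q.1 == p.1)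
    let diff := rest.dropWhile (fun q => q.1 == p.1)
    (p :: same) :: crcRuns diff
termination_by l => l.length
decreasing_by
  have h := (List.dropWhile_sublist (l := rest) (p := fun q => q.1 == p.1)).length_le
  simp only [List.length_cons]
  omega

def create_reducer_chunks_alt (sorted_lines : List (String × String)) (num_reducers : Int) : List (List (String × String)) :=
  let runs := crcRuns sorted_lines
  let limit := (num_reducers - 1).toNat      -- max(num_reducers - 1, 0)
  let chunks := runs.take limit              -- runs[:limit]
  let tail := runs.drop limit                -- runs[limit:]
  if tail.isEmpty then chunks else chunks ++ [tail.flatten]   -- if tail: chunks.append(flattened tail)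

-- ===== PRECONDITION & SPEC =====
def Spec_create_reducer_chunks (sorted_lines : List (String × String)) (num_reducers : Int) (out : List (List (String × String))) : Prop := out = create_reducer_chunks_alt sorted_lines num_reducers
instance (sorted_lines : List (String × String)) (num_reducers : Int) (out : List (List (String × String))) : Decidable (Spec_create_reducer_chunks sorted_lines num_reducers out) := by unfold Spec_create_reducer_chunks; infer_instance

-- ===== CLAIM (what is proved, stated in full; the proofs are below) =====
def Claim_equal_create_reducer_chunks : Prop := ∀ (sorted_lines : List (String × String)) (num_reducers : Int), Dom_create_reducer_chunks sorted_lines num_reducers → Spec_create_reducer_chunks sorted_lines num_reducers (create_reducer_chunks sorted_lines num_reducers)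

-- ===== LEMMAS AND PROOFS =====

-- B's post-processing of the run list, abstracted over the slice length
def crcMerge (m : Nat) (rs : List (List (String × String))) : List (List (String × String)) :=
  if (rs.drop m).isEmpty then rs.take m else rs.take m ++ [(rs.drop m).flatten]

theorem crcMerge_singleton (m : Nat) (c : List (String × String)) :
    crcMerge m [c] = [c] := by
  cases m with
  | zero => simp [crcMerge]
  | succ k => simp [crcMerge]

theorem crcMerge_cons_pos (m : Nat) (hm : 0 < m) (c : List (String × String))
    (rs : List (List (String × String))) :
    crcMerge m (c :: rs) = c :: crcMerge (m - 1) rs := by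
  obtain ⟨k, rfl⟩ : ∃ k, m = k + 1 := ⟨m - 1, by omega⟩
  simp only [crcMerge, List.take_succ_cons, List.drop_succ_cons, Nat.add_sub_cancel]
  split <;> simp

theorem crcFlatten_runs (l : List (String × String)) : (crcRuns l).flatten = l := by
  induction l using crcRuns.induct with
  | case1 => rw [crcRuns.eq_1]; rfl
  | case2 p rest diff ih =>
    rw [crcRuns.eq_2, List.flatten_cons]
    rw [ih, List.cons_append, List.takeWhile_append_dropWhile]

-- elements with the current artist are absorbed into the open chunk
theorem crcAbsorb (n : Int) (a : String) (same diff : List (String × String))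
    (hsame : ∀ q ∈ same, q.1 = a) (rc : List (List (String × String)))
    (chunk : List (String × String)) :
    (same ++ diff).foldl (crcStepA n) (rc, chunk, some a)
      = diff.foldl (crcStepA n) (rc, chunk ++ same, some a) := by
  induction same generalizing chunk with
  | nil => simp
  | cons q same ih =>
    have hq : q.1 = a := hsame q (by simp)
    simp only [List.cons_append, List.foldl_cons]
    rw [show crcStepA n (rc, chunk, some a) q = (rc, chunk ++ [q], some a) by
      simp [crcStepA, hq]]
    rw [ih (fun r hr => hsame r (by simp [hr]))]
    simp

-- once the reducer-count bound is reached, everything left joins the open chunk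
theorem crcSaturated (n : Int) (a : String) (l : List (String × String))
    (rc : List (List (String × String))) (chunk : List (String × String))
    (hge : ¬ (rc.length : Int) < n - 1) :
    l.foldl (crcStepA n) (rc, chunk, some a) = (rc, chunk ++ l, some a) := by
  induction l generalizing chunk with
  | nil => simp
  | cons q l ih =>
    simp only [List.foldl_cons]
    rw [show crcStepA n (rc, chunk, some a) q = (rc, chunk ++ [q], some a) by
      simp [crcStepA, hge]]
    rw [ih]
    simp

-- main invariant: from an open nonempty chunk whose artist differs from the head of the
-- remaining input, A's loop + final flush produce rc ++ B's merge of (chunk :: runs)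
theorem crcMain (n : Int) (N : Nat) :
    ∀ (l : List (String × String)), l.length ≤ N →
    ∀ (rc : List (List (String × String))) (chunk : List (String × String)) (a : String),
    chunk ≠ [] → (∀ p, l.head? = some p → p.1 ≠ a) →
    (let st := l.foldl (crcStepA n) (rc, chunk, some a)
     if st.2.1.isEmpty then st.1 else st.1 ++ [st.2.1])
      = rc ++ crcMerge ((n - 1).toNat - rc.length) (chunk :: crcRuns l) := by
  induction N with
  | zero =>
    intro l hl rc chunk a hc _
    have : l = [] := List.eq_nil_of_length_eq_zero (by omega)
    subst this
    simp only [List.foldl_nil, crcRuns.eq_1, crcMerge_singleton]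
    simp [hc]
  | succ N ih =>
    intro l hl rc chunk a hc hhead
    cases l with
    | nil =>
      simp only [List.foldl_nil, crcRuns.eq_1, crcMerge_singleton]
      simp [hc]
    | cons p rest =>
      have hpa : p.1 ≠ a := hhead p rfl
      by_cases hlt : (rc.length : Int) < n - 1
      · -- a new chunk is opened for p's run
        simp only [List.foldl_cons]
        rw [show crcStepA n (rc, chunk, some a) p = (rc ++ [chunk], [p], some p.1) by
          simp [crcStepA, hlt, hpa]]
        have hsplit : rest = rest.takeWhile (fun q => q.1 == p.1)
            ++ rest.dropWhile (fun q => q.1 == p.1) :=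
          (List.takeWhile_append_dropWhile).symm
        rw [hsplit]
        rw [crcAbsorb n p.1 _ _ (fun q hq => by
          have := List.mem_takeWhile_imp hq
          exact of_decide_eq_true this)]
        have hdlen : (rest.dropWhile (fun q => q.1 == p.1)).length ≤ N := by
          have h := (List.dropWhile_sublist (l := rest)
            (p := fun q => q.1 == p.1)).length_le
          simp only [List.length_cons] at hl
          omega
        have hdhead : ∀ q, (rest.dropWhile (fun q => q.1 == p.1)).head? = some q →
            q.1 ≠ p.1 := by
          intro q hq
          have := List.head?_dropWhile_not (p := fun q => q.1 == p.1) (l := rest)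
          rw [hq] at this
          simpa using this
        rw [ih _ hdlen (rc ++ [chunk]) _ p.1 (by simp) hdhead]
        rw [crcRuns.eq_2]
        have hm : 0 < (n - 1).toNat - rc.length := by omega
        rw [crcMerge_cons_pos _ hm]
        simp only [List.length_append, List.length_cons, List.length_nil]
        have : (n - 1).toNat - (rc.length + 0 + 1) = (n - 1).toNat - rc.length - 1 := by
          omega
        rw [this]
        simp
      · -- saturated: everything is appended to the open chunk
        rw [crcSaturated n a _ rc chunk hlt]
        have hm0 : (n - 1).toNat - rc.length = 0 := by omega
        rw [hm0]
        have hne : chunk ++ p :: rest ≠ [] := by simp [hc]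
        simp only [crcMerge, List.drop_zero, List.take_zero, List.nil_append,
          List.isEmpty_cons, Bool.false_eq_true, if_false]
        rw [List.flatten_cons, crcFlatten_runs]
        simp [hne]

-- ===== VERDICT (by name: the statement is the Claim_ definition above) =====
theorem create_reducer_chunks_spec : Claim_equal_create_reducer_chunks := by
  intro sorted_lines num_reducers _
  unfold Spec_create_reducer_chunks create_reducer_chunks create_reducer_chunks_alt
  cases sorted_lines with
  | nil => simp only [List.foldl_nil, crcRuns.eq_1]; simp
  | cons p rest =>
    simp only [List.foldl_cons]
    rw [show crcStepA num_reducers ([], [], none) p = ([], [p], some p.1) by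
      simp [crcStepA]]
    have hsplit : rest = rest.takeWhile (fun q => q.1 == p.1)
        ++ rest.dropWhile (fun q => q.1 == p.1) :=
      (List.takeWhile_append_dropWhile).symm
    conv_lhs => rw [hsplit]
    rw [crcAbsorb num_reducers p.1 _ _ (fun q hq => by
      have := List.mem_takeWhile_imp hq
      exact of_decide_eq_true this)]
    have hdhead : ∀ q, (rest.dropWhile (fun q => q.1 == p.1)).head? = some q →
        q.1 ≠ p.1 := by
      intro q hq
      have := List.head?_dropWhile_not (p := fun q => q.1 == p.1) (l := rest)
      rw [hq] at this
      simpa using this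
    rw [crcMain num_reducers (rest.dropWhile (fun q => q.1 == p.1)).length _ le_rfl
      [] _ p.1 (by simp) hdhead]
    rw [crcRuns.eq_2]
    rfl
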